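-- pv_equiv track=rewrite | github.com/skochv04/algorithms-and-data-structures | BeforeExam 2 - Greedy algorithms/13 wrath.py | wrath
-- ===== SOURCE A (Python) =====
-- def wrath(L):
--     n = len(L)
--     T = [False for _ in range(n)]
--     result = 1
--     ind = n - 1
--     for i in range(n-1, -1, -1):
--         if i == ind:
--             T[ind] = True
--         ind = min(ind, i - L[i] - 1)
--     result = 0
--     for i in range(n):
--         if T[i]:
--             result += 1
--     return result
-- ===== SOURCE B (Python) =====
-- def wrath(L):
--     # Segment-by-segment greedy: count a boundary at position i, then scan
--     # left taking the running min of reach values until the scan index hits it.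
--     count = 0
--     i = len(L) - 1
--     while i >= 0:
--         count += 1
--         limit = min(i, i - L[i] - 1)
--         j = i - 1
--         while j >= 0 and j != limit:
--             limit = min(limit, j - L[j] - 1)
--             j -= 1
--         i = j
--     return count
-- ===== Notes on version B (the rewrite author's own statement) =====
-- stated objective: alternative
-- what changed: Replaces A's boolean mark array built by one full scan plus a separate counting pass with a segment-by-segment greedy that keeps only a counter and the current position, scanning each segment's running-min reach until the scan index meets it.
import Mathlib
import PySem

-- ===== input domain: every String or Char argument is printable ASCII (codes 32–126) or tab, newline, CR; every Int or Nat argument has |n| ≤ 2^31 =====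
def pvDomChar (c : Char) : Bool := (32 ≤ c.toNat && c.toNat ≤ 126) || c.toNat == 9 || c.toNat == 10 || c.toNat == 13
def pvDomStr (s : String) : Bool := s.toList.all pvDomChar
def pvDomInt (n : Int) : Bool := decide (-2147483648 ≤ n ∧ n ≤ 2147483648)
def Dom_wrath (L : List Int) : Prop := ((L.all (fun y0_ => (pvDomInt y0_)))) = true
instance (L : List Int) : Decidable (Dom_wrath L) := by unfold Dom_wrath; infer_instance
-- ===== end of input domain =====

-- B replaces A's boolean-array marking plus separate counting pass by a
-- segment-by-segment greedy keeping only a counter and the current position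
-- (objective: alternative decomposition, same asymptotic cost).

-- ===== PORT A =====
-- one step of A's main loop: mark T[ind] when i == ind, then lower ind
def wrathStep (L : List Int) (st : List Bool × Int) (i : Int) : List Bool × Int :=
  (if i == st.2 then st.1.set st.2.toNat true else st.1,
   min st.2 (i - PySem.List.pyGetD L i 0 - 1))

def wrath (L : List Int) : Int :=
  let n : Int := PySem.List.len L
  let T : List Bool := (PySem.List.pyRange 0 n 1).map (fun _ => false)
  -- (Python's `result = 1` before the loop is dead: it is overwritten below)
  let st := (PySem.List.pyRange (n - 1) (-1) (-1)).foldl (wrathStep L) (T, n - 1)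
  (PySem.List.pyRange 0 n 1).foldl
    (fun r i => if PySem.List.pyGetD st.1 i false then r + 1 else r) 0

-- ===== PORT B =====
-- inner while loop of Source B: scan j downward taking the running min until j hits limit
-- (fuel only guards totality: fuel = (j+1).toNat steps always suffice, the loop exits on j < 0)
def wrathInner (L : List Int) (fuel : Nat) (j limit : Int) : Int :=
  match fuel with
  | 0 => j
  | f + 1 =>
      if 0 ≤ j ∧ j ≠ limit then
        wrathInner L f (j - 1) (min limit (j - PySem.List.pyGetD L j 0 - 1))
      else j

-- outer while loop of Source B (fuel again only guards totality: i strictly decreases)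
def wrathOuter (L : List Int) (fuel : Nat) (i count : Int) : Int :=
  match fuel with
  | 0 => count
  | f + 1 =>
      if 0 ≤ i then
        wrathOuter L f (wrathInner L i.toNat (i - 1) (min i (i - PySem.List.pyGetD L i 0 - 1))) (count + 1)
      else count

def wrath_alt (L : List Int) : Int := wrathOuter L (PySem.List.len L).toNat (PySem.List.len L - 1) 0

-- ===== PRECONDITION & SPEC =====
def Spec_wrath (L : List Int) (out : Int) : Prop := out = wrath_alt L
instance (L : List Int) (out : Int) : Decidable (Spec_wrath L out) := by unfold Spec_wrath; infer_instance

-- ===== CLAIM (what is proved, stated in full; the proofs are below) =====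
def Claim_equal_wrath : Prop := ∀ (L : List Int), Dom_wrath L → Spec_wrath L (wrath L)

-- ===== LEMMAS AND PROOFS =====

-- number of boundaries A's scan produces from position i with running min ind
def aCount (L : List Int) (i ind : Int) : Int :=
  if h : 0 ≤ i then
    (if i = ind then 1 else 0) + aCount L (i - 1) (min ind (i - PySem.List.pyGetD L i 0 - 1))
  else 0
termination_by (i + 1).toNat
decreasing_by omega

-- B's inner loop only moves j down
theorem wrathInner_le (L : List Int) (fuel : Nat) :
    ∀ (j limit : Int), wrathInner L fuel j limit ≤ j := by
  induction fuel with
  | zero => intro j limit; simp only [wrathInner]; omega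
  | succ f ih =>
      intro j limit
      simp only [wrathInner]
      split_ifs with h
      · have := ih (j - 1) (min limit (j - PySem.List.pyGetD L j 0 - 1))
        omega
      · omega

-- B's inner loop consumes exactly the non-boundary part of aCount
theorem wrathInner_aCount (L : List Int) (fuel : Nat) :
    ∀ (j limit : Int), (j + 1).toNat ≤ fuel →
    aCount L j limit =
      (if 0 ≤ wrathInner L fuel j limit then
        aCount L (wrathInner L fuel j limit) (wrathInner L fuel j limit) else 0) := by
  induction fuel with
  | zero =>
      intro j limit hf
      have hj : ¬ (0 : Int) ≤ j := by omega
      simp only [wrathInner]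
      rw [if_neg hj, aCount, dif_neg hj]
  | succ f ih =>
      intro j limit hf
      simp only [wrathInner]
      by_cases h : 0 ≤ j ∧ j ≠ limit
      · rw [if_pos h, ← ih (j - 1) (min limit (j - PySem.List.pyGetD L j 0 - 1)) (by omega)]
        conv_lhs => rw [aCount]
        rw [dif_pos h.1, if_neg h.2]
        ring
      · rw [if_neg h]
        rcases Decidable.em (0 ≤ j) with hj | hj
        · have hje : j = limit := by tauto
          subst hje
          rw [if_pos hj]
        · rw [if_neg hj, aCount, dif_neg hj]

-- B's outer loop computes aCount
theorem wrathOuter_aCount (L : List Int) (fuel : Nat) :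
    ∀ (i count : Int), (i + 1).toNat ≤ fuel →
    wrathOuter L fuel i count = count + (if 0 ≤ i then aCount L i i else 0) := by
  induction fuel with
  | zero =>
      intro i count hf
      simp only [wrathOuter]
      rw [if_neg (by omega : ¬ (0 : Int) ≤ i)]
      ring
  | succ f ih =>
      intro i count hf
      simp only [wrathOuter]
      by_cases h : 0 ≤ i
      · have hle := wrathInner_le L i.toNat (i - 1) (min i (i - PySem.List.pyGetD L i 0 - 1))
        rw [if_pos h, ih _ _ (by omega),
          ← wrathInner_aCount L i.toNat (i - 1) (min i (i - PySem.List.pyGetD L i 0 - 1)) (by omega),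
          if_pos h]
        conv_rhs => rw [aCount]
        rw [dif_pos h, if_pos rfl]
        ring
      · rw [if_neg h, if_neg h]; ring

-- counting trues with a foldl accumulator is countP
theorem foldl_count_true (T : List Bool) (acc : Int) :
    T.foldl (fun r b => if b then r + 1 else r) acc = acc + (T.countP id : Int) := by
  induction T generalizing acc with
  | nil => simp
  | cons b T ih =>
      cases b
      · simp [List.foldl_cons, ih]
      · simp [List.foldl_cons, ih]; ring

-- setting a false cell to true raises the count of trues by one
theorem countP_set_true (T : List Bool) (m : Nat) (hm : m < T.length)
    (hf : T.getD m false = false) : (T.set m true).countP id = T.countP id + 1 := by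
  induction T generalizing m with
  | nil => simp at hm
  | cons b T ih =>
      cases m with
      | zero => simp_all
      | succ m =>
          simp only [List.set_cons_succ, List.countP_cons]
          have := ih m (by simpa using hm) (by simpa using hf)
          omega

-- invariant of A's main fold: countP of the marks grows by aCount, length is kept
theorem wrath_fold_inv (L : List Int) (m : Nat) :
    ∀ (k : Int) (T : List Bool) (ind : Int), (k + 1).toNat ≤ m →
    k < (T.length : Int) →
    (∀ jn : Nat, (jn : Int) ≤ k → T.getD jn false = false) →
    ((((PySem.List.pyRange k (-1) (-1)).foldl (wrathStep L) (T, ind)).1.countP id : Int) =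
        (T.countP id : Int) + aCount L k ind) ∧
      ((PySem.List.pyRange k (-1) (-1)).foldl (wrathStep L) (T, ind)).1.length = T.length := by
  induction m with
  | zero =>
      intro k T ind hm hk hT
      rw [PySem.List.pyRange_neg_one_eq_nil (by omega : k ≤ -1)]
      simp only [List.foldl_nil]
      rw [aCount, dif_neg (by omega : ¬ (0 : Int) ≤ k)]
      exact ⟨by ring, by simp⟩
  | succ m ihm =>
      intro k T ind hm hk hT
      rcases Decidable.em (0 ≤ k) with h | h
      · rw [PySem.List.pyRange_neg_one_cons (by omega : (-1 : Int) < k)]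
        simp only [List.foldl_cons]
        have hA : aCount L k ind =
            (if k = ind then 1 else 0) + aCount L (k - 1) (min ind (k - PySem.List.pyGetD L k 0 - 1)) := by
          conv_lhs => rw [aCount]
          rw [dif_pos h]
        by_cases hie : k = ind
        · have hstep : wrathStep L (T, ind) k =
              (T.set ind.toNat true, min ind (k - PySem.List.pyGetD L k 0 - 1)) := by
            simp [wrathStep, hie]
          rw [hstep]
          have hlen : (T.set ind.toNat true).length = T.length := by simp
          have hT' : ∀ jn : Nat, (jn : Int) ≤ k - 1 → (T.set ind.toNat true).getD jn false = false := by
            intro jn hjn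
            have hne : ind.toNat ≠ jn := by omega
            rw [List.getD_eq_getElem?_getD, List.getElem?_set_ne hne,
                ← List.getD_eq_getElem?_getD]
            exact hT jn (by omega)
          have hcnt : (T.set ind.toNat true).countP id = T.countP id + 1 := by
            apply countP_set_true T ind.toNat (by omega)
            exact hT ind.toNat (by omega)
          have hrec := ihm (k - 1) (T.set ind.toNat true) (min ind (k - PySem.List.pyGetD L k 0 - 1))
            (by omega) (by rw [hlen]; omega) hT'
          constructor
          · rw [hrec.1, hcnt, hA, if_pos hie]; push_cast; ring
          · rw [hrec.2, hlen]
        · have hstep : wrathStep L (T, ind) k =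
              (T, min ind (k - PySem.List.pyGetD L k 0 - 1)) := by
            simp [wrathStep, hie]
          rw [hstep]
          have hT' : ∀ jn : Nat, (jn : Int) ≤ k - 1 → T.getD jn false = false :=
            fun jn hjn => hT jn (by omega)
          have hrec := ihm (k - 1) T (min ind (k - PySem.List.pyGetD L k 0 - 1))
            (by omega) (by omega) hT'
          constructor
          · rw [hrec.1, hA, if_neg hie]; ring
          · exact hrec.2
      · rw [PySem.List.pyRange_neg_one_eq_nil (by omega : k ≤ -1)]
        simp only [List.foldl_nil]
        rw [aCount, dif_neg h]
        exact ⟨by ring, by simp⟩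

-- ===== VERDICT (by name: the statement is the Claim_ definition above) =====
theorem wrath_spec : Claim_equal_wrath := by
  intro L _
  unfold Spec_wrath wrath wrath_alt
  simp only []
  set n : Int := PySem.List.len L with hn
  have hn0 : 0 ≤ n := by simp [hn, PySem.List.len]
  set T0 : List Bool := (PySem.List.pyRange 0 n 1).map (fun _ => false) with hT0
  have hT0len : (T0.length : Int) = n := by
    simp [hT0, PySem.List.length_pyRange_one]; omega
  have hT0get : ∀ jn : Nat, (jn : Int) ≤ n - 1 → T0.getD jn false = false := by
    intro jn hjn
    rcases Decidable.em (jn < T0.length) with hlt | hlt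
    · rw [List.getD_eq_getElem?_getD, List.getElem?_eq_getElem hlt]
      simp [hT0]
    · rw [List.getD_eq_getElem?_getD, List.getElem?_eq_none (by omega)]
      rfl
  have hT0cnt : T0.countP id = 0 := by
    simp [hT0, List.countP_eq_zero]
  have hinv := wrath_fold_inv L n.toNat (n - 1) T0 (n - 1) (by omega) (by omega) hT0get
  set stf := (PySem.List.pyRange (n - 1) (-1) (-1)).foldl (wrathStep L) (T0, n - 1) with hstf
  have hlenf : (stf.1.length : Int) = n := by rw [hinv.2]; exact hT0len
  have hcountpass :
      (PySem.List.pyRange 0 n 1).foldl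
        (fun r i => if PySem.List.pyGetD stf.1 i false then r + 1 else r) 0
        = (stf.1.countP id : Int) := by
    rw [show n = (stf.1.length : Int) from hlenf.symm]
    rw [PySem.List.foldl_pyRange_zero_pyGetD' stf.1 false
      (fun r b => if b then r + 1 else r) 0]
    rw [foldl_count_true]; ring
  rw [hcountpass, hinv.1, hT0cnt]
  rw [wrathOuter_aCount L n.toNat (n - 1) 0 (by omega)]
  rcases Decidable.em (0 ≤ n - 1) with h1 | h1
  · rw [if_pos h1]; push_cast; ring
  · rw [if_neg h1, aCount, dif_neg h1]; simp
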